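-- pv_equiv track=rewrite | github.com/Pierian-Data/Complete-Python-3-Bootcamp | Comp9021/Quiz 2/q2.py | binary_lunar_multiplication
-- ===== SOURCE A (Python) =====
-- def binary_lunar_addition(number_1, number_2):
--     result = 0
--     # INSERT YOUR CODE HERE
--     list_n1 =list(reversed(list(map(int, str(number_1)))))
--     list_n2 =list(reversed(list(map(int, str(number_2)))))
--
--     if number_1 >= number_2:
--       for i in range(len(list_n2)):
--         list_n1[i] = max(list_n1[i], list_n2[i])
--       result = int(''.join([str(i) for i in reversed(list_n1)]))
--     else:
--       for i in range(len(list_n1)):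
--         list_n2[i] = max(list_n2[i], list_n1[i])
--       result = int(''.join([str(i) for i in reversed(list_n2)]))
--
--     return result
--
-- def binary_lunar_multiplication(multiplicand, multiplier):
--     result = 0
--     # INSERT YOUR CODE HERE
--     multiplicandList = list(map(int, str(multiplicand)))
--     multiplierList = list(map(int, str(multiplier)))
--     tentimes =0
--
--     for multiplierDigit in reversed(multiplierList):
--       currentDigitResultList=[]
--       for multiplicandDigit in multiplicandList:
--         currentDigitResultList.append(min(multiplicandDigit,multiplierDigit))
--       currentResult = int(''.join([str(i) for i in currentDigitResultList])) * 10**tentimes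
--       tentimes +=1
--       result = binary_lunar_addition(result, currentResult)
--
--     return result
-- ===== SOURCE B (Python) =====
-- def binary_lunar_multiplication(multiplicand, multiplier):
--     # lunar product digit k = max over i+j=k of min(digit_i(multiplicand), digit_j(multiplier)):
--     # computed directly as one max-min convolution, with no intermediate numbers and no lunar-addition merges.
--     a = list(map(int, str(multiplicand)))[::-1]
--     b = list(map(int, str(multiplier)))[::-1]
--     res = [0] * (len(a) + len(b) - 1)
--     for i in range(len(a)):
--         for j in range(len(b)):
--             m = min(a[i], b[j])
--             if m > res[i + j]:
--                 res[i + j] = m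
--     return int(''.join(map(str, reversed(res))))
-- ===== Notes on version B (the rewrite author's own statement) =====
-- stated objective: alternative
-- what changed: A builds one partial lunar product per multiplier digit as an integer (re-stringifying and re-parsing digits) and folds them together with repeated lunar additions; B computes each result digit directly as a single max-min convolution into one digit array, with no intermediate integers and no lunar-addition merges.
import Mathlib
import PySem

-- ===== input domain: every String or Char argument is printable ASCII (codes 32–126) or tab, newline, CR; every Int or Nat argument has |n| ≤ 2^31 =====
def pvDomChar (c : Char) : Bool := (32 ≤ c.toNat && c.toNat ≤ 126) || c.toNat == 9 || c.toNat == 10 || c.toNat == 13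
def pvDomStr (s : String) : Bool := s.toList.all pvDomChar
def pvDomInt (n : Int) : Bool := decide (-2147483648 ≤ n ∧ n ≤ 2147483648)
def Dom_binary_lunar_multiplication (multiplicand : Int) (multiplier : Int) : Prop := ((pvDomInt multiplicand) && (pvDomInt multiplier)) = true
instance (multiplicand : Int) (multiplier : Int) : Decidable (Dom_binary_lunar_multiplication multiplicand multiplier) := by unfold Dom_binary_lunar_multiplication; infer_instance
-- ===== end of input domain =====

-- B replaces A's per-digit partial products and repeated lunar-addition merges by one direct
-- max-min convolution into a single digit array (objective: alternative decomposition, same cost class).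


-- ===== PORT A =====
-- shared helper of both Pythons: list(map(int, str(n))), least-significant digit FIRST here
-- (both Pythons build the most-significant-first list and reverse it where needed);
-- exact for n ≥ 0; for n < 0 Python raises ValueError (excluded by Pre_).
def lsbDigits (n : Int) : List Int :=
  if n.toNat = 0 then [0] else (Nat.digits 10 n.toNat).map Int.ofNat

-- list(map(int, str(n))): most-significant digit first, as in both Pythons
def pyDigits (n : Int) : List Int := (lsbDigits n).reverse

-- int(''.join(str(d) for d in l)) for a most-significant-first list of single digits 0..9
-- (the only lists either Python builds on admitted inputs)
def valMSB (l : List Int) : Int := l.foldl (fun a d => 10 * a + d) 0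

def binary_lunar_addition (number_1 : Int) (number_2 : Int) : Int :=
  let list_n1 := (pyDigits number_1).reverse
  let list_n2 := (pyDigits number_2).reverse
  if number_1 ≥ number_2 then
    -- for i in range(len(list_n2)): list_n1[i] = max(list_n1[i], list_n2[i])
    -- (index i is in range on admitted inputs: number_1 ≥ number_2 ≥ 0 gives len list_n1 ≥ len list_n2)
    let l := (List.range list_n2.length).foldl
      (fun l i => l.set i (max (l.getD i 0) (list_n2.getD i 0))) list_n1
    valMSB l.reverse
  else
    let l := (List.range list_n1.length).foldl
      (fun l i => l.set i (max (l.getD i 0) (list_n1.getD i 0))) list_n2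
    valMSB l.reverse

def binary_lunar_multiplication (multiplicand : Int) (multiplier : Int) : Int :=
  let multiplicandList := pyDigits multiplicand
  let multiplierList := pyDigits multiplier
  -- state = (tentimes, result), initial (0, 0); loop over reversed(multiplierList)
  (multiplierList.reverse.foldl
    (fun (st : Nat × Int) multiplierDigit =>
      let currentDigitResultList := multiplicandList.map (fun x => min x multiplierDigit)
      let currentResult := valMSB currentDigitResultList * 10 ^ st.1
      (st.1 + 1, binary_lunar_addition st.2 currentResult))
    (0, 0)).2

-- ===== PORT B =====
def binary_lunar_multiplication_alt (multiplicand : Int) (multiplier : Int) : Int :=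
  let a := (pyDigits multiplicand).reverse
  let b := (pyDigits multiplier).reverse
  -- res = [0] * (len(a) + len(b) - 1); indices a[i], b[j], res[i+j] are in range (i < len a, j < len b)
  let res := (List.range a.length).foldl (fun res i =>
      (List.range b.length).foldl (fun res j =>
        let m := min (a.getD i 0) (b.getD j 0)
        if m > res.getD (i + j) 0 then res.set (i + j) m else res) res)
    (List.replicate (a.length + b.length - 1) 0)
  valMSB res.reverse

-- ===== PRECONDITION & SPEC =====
-- Pre_ excludes negative arguments: on them str(n) starts with '-' and both Pythons raise
-- ValueError in int('-'); A returns normally on every nonnegative pair.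
def Pre_binary_lunar_multiplication (multiplicand : Int) (multiplier : Int) : Prop :=
  0 ≤ multiplicand ∧ 0 ≤ multiplier
instance (multiplicand : Int) (multiplier : Int) : Decidable (Pre_binary_lunar_multiplication multiplicand multiplier) := by unfold Pre_binary_lunar_multiplication; infer_instance

def pvWitness_binary_lunar_multiplication : Int × Int := (98, 123)

def Spec_binary_lunar_multiplication (multiplicand : Int) (multiplier : Int) (out : Int) : Prop := out = binary_lunar_multiplication_alt multiplicand multiplier
instance (multiplicand : Int) (multiplier : Int) (out : Int) : Decidable (Spec_binary_lunar_multiplication multiplicand multiplier out) := by unfold Spec_binary_lunar_multiplication; infer_instance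

-- ===== CLAIM (what is proved, stated in full; the proofs are below) =====
def Claim_equal_binary_lunar_multiplication : Prop := ∀ (multiplicand : Int) (multiplier : Int), Dom_binary_lunar_multiplication multiplicand multiplier → Pre_binary_lunar_multiplication multiplicand multiplier → Spec_binary_lunar_multiplication multiplicand multiplier (binary_lunar_multiplication multiplicand multiplier)

-- ===== LEMMAS AND PROOFS =====

-- value of a least-significant-first digit list
def digSL : List Int → Int
  | [] => 0
  | d :: t => d + 10 * digSL t

-- k-th decimal digit of x (exact for 0 ≤ x)
def dig (x : Int) (k : Nat) : Int := x / 10 ^ k % 10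

-- max of F 0, …, F (n-1) and 0
def fmax (n : Nat) (F : Nat → Int) : Int := (List.range n).foldl (fun acc j => max acc (F j)) 0

-- digit k of the partial lunar product after the first t multiplier digits (A's shape)
def termA (a b : List Int) (k j : Nat) : Int :=
  if j ≤ k then min (a.getD (k - j) 0) (b.getD j 0) else 0
def cfA (a b : List Int) (t k : Nat) : Int := fmax t (termA a b k)

-- digit k of B's convolution array after the first n outer iterations
def termB (a b : List Int) (L k i : Nat) : Int :=
  if i ≤ k ∧ k - i < b.length ∧ k < L then min (a.getD i 0) (b.getD (k - i) 0) else 0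
def cfB (a b : List Int) (L n k : Nat) : Int := fmax n (termB a b L k)

theorem valMSB_reverse (l : List Int) : valMSB l.reverse = digSL l := by
  have key : ∀ (l : List Int) (a : Int), l.reverse.foldl (fun a d => 10 * a + d) a
      = a * 10 ^ l.length + digSL l := by
    intro l
    induction l with
    | nil => simp [digSL]
    | cons d t ih =>
      intro a
      simp only [List.reverse_cons, List.foldl_append, List.foldl_cons, List.foldl_nil, ih, digSL,
        List.length_cons]
      ring
  simpa [valMSB] using key l 0

theorem digSL_nonneg (l : List Int) (h : ∀ d ∈ l, 0 ≤ d) : 0 ≤ digSL l := by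
  induction l with
  | nil => simp [digSL]
  | cons d t ih =>
    simp only [List.mem_cons] at h
    have := ih (fun d hd => h d (Or.inr hd))
    have := h d (Or.inl rfl)
    simp only [digSL]; omega

theorem dig_succ (x : Int) (k : Nat) : dig x (k + 1) = dig (x / 10) k := by
  unfold dig
  rw [pow_succ, mul_comm, ← Int.ediv_ediv_of_nonneg (x := x) (by norm_num : (0:Int) ≤ 10)]

theorem bounded_getD (l : List Int) (h : ∀ d ∈ l, 0 ≤ d ∧ d < 10) (k : Nat) :
    0 ≤ l.getD k 0 ∧ l.getD k 0 < 10 := by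
  by_cases hk : k < l.length
  · rw [l.getD_eq_getElem 0 hk]; exact h _ (l.getElem_mem hk)
  · rw [List.getD_eq_default _ _ (by omega)]; norm_num

theorem dig_digSL (l : List Int) (h : ∀ d ∈ l, 0 ≤ d ∧ d < 10) (k : Nat) :
    dig (digSL l) k = l.getD k 0 := by
  induction l generalizing k with
  | nil => simp [digSL, dig]
  | cons d t ih =>
    simp only [List.mem_cons] at h
    have hd := h d (Or.inl rfl)
    have ht : ∀ d ∈ t, 0 ≤ d ∧ d < 10 := fun d hd => h d (Or.inr hd)
    have hS : 0 ≤ digSL t := digSL_nonneg t (fun d hd => (ht d hd).1)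
    cases k with
    | zero =>
      show dig (digSL (d :: t)) 0 = d
      simp only [digSL, dig, pow_zero, Int.ediv_one]
      omega
    | succ k =>
      rw [dig_succ]
      have : digSL (d :: t) / 10 = digSL t := by
        simp only [digSL]; omega
      rw [this, ih ht]
      rfl

theorem natDigits_getD (m k : Nat) : (Nat.digits 10 m).getD k 0 = m / 10 ^ k % 10 := by
  induction m using Nat.strong_induction_on generalizing k with
  | _ m ih =>
    rcases Nat.eq_zero_or_pos m with hm | hm
    · simp [hm]
    · rw [Nat.digits_def' (by norm_num : 1 < 10) hm]
      cases k with
      | zero => simp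
      | succ k =>
        simp only [List.getD_cons_succ]
        rw [ih (m / 10) (Nat.div_lt_self hm (by norm_num)) k,
          Nat.div_div_eq_div_mul, ← pow_succ']

theorem lsbDigits_bounds (n : Int) : ∀ d ∈ lsbDigits n, 0 ≤ d ∧ d < 10 := by
  intro d hd
  unfold lsbDigits at hd
  split at hd
  · simp at hd; omega
  · simp only [List.mem_map] at hd
    obtain ⟨e, he, rfl⟩ := hd
    have := Nat.digits_lt_base (by norm_num) he
    simp only [Int.ofNat_eq_natCast]
    omega

theorem lsbDigits_getD (n : Int) (hn : 0 ≤ n) (k : Nat) :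
    (lsbDigits n).getD k 0 = dig n k := by
  have hcast : n = (n.toNat : Int) := by omega
  unfold lsbDigits
  split
  · rename_i h
    have : n = 0 := by omega
    subst this
    cases k <;> simp [dig]
  · rename_i h
    by_cases hk : k < (Nat.digits 10 n.toNat).length
    · rw [List.getD_eq_getElem _ _ (by simpa using hk), List.getElem_map,
        ← List.getD_eq_getElem _ _ hk, natDigits_getD]
      rw [hcast]
      unfold dig
      rfl
    · rw [List.getD_eq_default _ _ (by simpa using hk)]
      have hlt : n.toNat < 10 ^ k := by
        calc n.toNat < 10 ^ (Nat.digits 10 n.toNat).length :=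
              Nat.lt_base_pow_length_digits (by norm_num)
          _ ≤ 10 ^ k := Nat.pow_le_pow_right (by norm_num) (by omega)
      unfold dig
      rw [Int.ediv_eq_zero_of_lt (by omega) (by rw [hcast]; exact_mod_cast hlt)]
      simp

theorem lsbDigits_len_mono {x y : Int} (hxy : y ≤ x) :
    (lsbDigits y).length ≤ (lsbDigits x).length := by
  have hle : y.toNat ≤ x.toNat := by omega
  unfold lsbDigits
  split
  · split
    · simp
    · rename_i h1 h2
      simp only [List.length_cons, List.length_nil, List.length_map]
      have hne : Nat.digits 10 x.toNat ≠ [] := Nat.digits_ne_nil_iff_ne_zero.mpr h2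
      have := List.length_pos_of_ne_nil hne
      omega
  · rename_i h1
    have h2 : ¬ x.toNat = 0 := by omega
    rw [if_neg h2]
    simp only [List.length_map]
    rw [Nat.length_digits 10 _ (by norm_num) h1, Nat.length_digits 10 _ (by norm_num) h2]
    exact Nat.succ_le_succ (Nat.log_mono_right hle)

theorem getD_set' (l : List Int) (i k : Nat) (v : Int) :
    (l.set i v).getD k 0 = if i = k ∧ i < l.length then v else l.getD k 0 := by
  simp only [List.getD_eq_getElem?_getD, List.getElem?_set]
  rcases Decidable.em (i = k) with h1 | h1
  · subst h1
    rcases Decidable.em (i < l.length) with h2 | h2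
    · simp [h2]
    · simp [h2]
  · simp [h1]

theorem digSL_shift (l : List Int) (t : Nat) :
    digSL l * 10 ^ t = digSL (List.replicate t 0 ++ l) := by
  induction t with
  | zero => simp
  | succ t ih =>
    rw [List.replicate_succ, List.cons_append]
    show digSL l * 10 ^ (t + 1) = 0 + 10 * digSL (List.replicate t 0 ++ l)
    rw [← ih, pow_succ]
    ring

theorem getD_replicate_append (l : List Int) (t k : Nat) :
    (List.replicate t (0:Int) ++ l).getD k 0 = if k < t then 0 else l.getD (k - t) 0 := by
  induction t generalizing k with
  | zero => simp
  | succ t ih =>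
    rw [List.replicate_succ, List.cons_append]
    cases k with
    | zero => simp
    | succ k => simpa using ih k

theorem fmax_succ (n : Nat) (F : Nat → Int) : fmax (n + 1) F = max (fmax n F) (F n) := by
  simp [fmax, List.range_succ]

theorem fmax_nonneg (n : Nat) (F : Nat → Int) : 0 ≤ fmax n F := by
  induction n with
  | zero => simp [fmax]
  | succ n ih => rw [fmax_succ]; exact le_trans ih (le_max_left _ _)

theorem fmax_le (n : Nat) (F : Nat → Int) (c : Int) (h : ∀ j < n, F j ≤ c) (hc : 0 ≤ c) :
    fmax n F ≤ c := by
  induction n with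
  | zero => simpa [fmax] using hc
  | succ n ih =>
    rw [fmax_succ]
    exact max_le (ih (fun j hj => h j (by omega))) (h n (by omega))

theorem fmax_ge (n : Nat) (F : Nat → Int) (j : Nat) (hj : j < n) : F j ≤ fmax n F := by
  induction n with
  | zero => omega
  | succ n ih =>
    rw [fmax_succ]
    rcases Nat.lt_or_ge j n with h | h
    · exact le_trans (ih h) (le_max_left _ _)
    · have : j = n := by omega
      subst this
      exact le_max_right _ _

theorem setfold_len (l2 : List Int) (m : Nat) (l1 : List Int) :
    (((List.range m).foldl (fun l i => l.set i (max (l.getD i 0) (l2.getD i 0))) l1)).length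
      = l1.length := by
  induction m with
  | zero => simp
  | succ m ih =>
    rw [List.range_succ, List.foldl_append]
    simp only [List.foldl_cons, List.foldl_nil]
    rw [List.length_set, ih]

theorem setfold_getD (l2 : List Int) (m : Nat) (l1 : List Int) (k : Nat) :
    (((List.range m).foldl (fun l i => l.set i (max (l.getD i 0) (l2.getD i 0))) l1)).getD k 0
      = if k < m ∧ k < l1.length then max (l1.getD k 0) (l2.getD k 0) else l1.getD k 0 := by
  induction m generalizing k with
  | zero => simp
  | succ m ih =>
    rw [List.range_succ, List.foldl_append]
    simp only [List.foldl_cons, List.foldl_nil]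
    rw [getD_set', setfold_len, ih, ih]
    have hmm : ¬ (m < m ∧ m < l1.length) := by omega
    rw [if_neg hmm]
    rcases Decidable.em (m = k) with h1 | h1
    · subst h1
      rcases Decidable.em (m < l1.length) with h2 | h2
      · rw [if_pos ⟨rfl, h2⟩, if_pos ⟨by omega, h2⟩]
      · rw [if_neg (by omega), if_neg (by omega), if_neg (by omega)]
    · rw [if_neg (by omega)]
      rcases Decidable.em (k < m ∧ k < l1.length) with h2 | h2
      · rw [if_pos h2, if_pos ⟨by omega, h2.2⟩]
      · rw [if_neg h2, if_neg (by omega)]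

-- the body of binary_lunar_addition, for one ordering of the two digit lists
theorem addcore (d1 d2 : List Int) (h1 : ∀ d ∈ d1, 0 ≤ d ∧ d < 10)
    (h2 : ∀ d ∈ d2, 0 ≤ d ∧ d < 10) (hlen : d2.length ≤ d1.length) :
    0 ≤ valMSB ((List.range d2.length).foldl
        (fun l i => l.set i (max (l.getD i 0) (d2.getD i 0))) d1).reverse ∧
      ∀ k, dig (valMSB ((List.range d2.length).foldl
        (fun l i => l.set i (max (l.getD i 0) (d2.getD i 0))) d1).reverse) k
        = max (d1.getD k 0) (d2.getD k 0) := by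
  set r := (List.range d2.length).foldl
    (fun l i => l.set i (max (l.getD i 0) (d2.getD i 0))) d1 with hr
  have hrget : ∀ k, r.getD k 0 = max (d1.getD k 0) (d2.getD k 0) := by
    intro k
    rw [hr, setfold_getD]
    rcases Decidable.em (k < d2.length) with hk | hk
    · rw [if_pos ⟨hk, lt_of_lt_of_le hk hlen⟩]
    · rw [if_neg (by omega), List.getD_eq_default _ _ (by omega : d2.length ≤ k)]
      exact (max_eq_left (bounded_getD d1 h1 k).1).symm
  have hrbound : ∀ d ∈ r, 0 ≤ d ∧ d < 10 := by
    intro d hd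
    obtain ⟨k, hk, rfl⟩ := List.getElem_of_mem hd
    rw [← r.getD_eq_getElem 0 hk, hrget k]
    have b1 := bounded_getD d1 h1 k
    have b2 := bounded_getD d2 h2 k
    constructor
    · exact le_trans b1.1 (le_max_left _ _)
    · exact max_lt b1.2 b2.2
  rw [valMSB_reverse]
  exact ⟨digSL_nonneg _ (fun d hd => (hrbound d hd).1),
    fun k => by rw [dig_digSL _ hrbound, hrget]⟩

theorem add_spec {x y : Int} (hx : 0 ≤ x) (hy : 0 ≤ y) :
    0 ≤ binary_lunar_addition x y ∧
      ∀ k, dig (binary_lunar_addition x y) k = max (dig x k) (dig y k) := by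
  have hbx := lsbDigits_bounds x
  have hby := lsbDigits_bounds y
  unfold binary_lunar_addition
  simp only [pyDigits, List.reverse_reverse]
  split_ifs with h
  · have hc := addcore (lsbDigits x) (lsbDigits y) hbx hby (lsbDigits_len_mono h)
    refine ⟨hc.1, fun k => ?_⟩
    rw [hc.2 k, lsbDigits_getD x hx k, lsbDigits_getD y hy k]
  · have hxy : x ≤ y := by omega
    have hc := addcore (lsbDigits y) (lsbDigits x) hby hbx (lsbDigits_len_mono hxy)
    refine ⟨hc.1, fun k => ?_⟩
    rw [hc.2 k, lsbDigits_getD x hx k, lsbDigits_getD y hy k, max_comm]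

theorem A_loop (x : Int) (b : List Int) (hb : ∀ d ∈ b, 0 ≤ d ∧ d < 10)
    (suf : List Int) :
    ∀ (t : Nat) (R : Int), b.drop t = suf → 0 ≤ R →
      (∀ k, dig R k = cfA (lsbDigits x) b t k) →
      0 ≤ (suf.foldl (fun (st : Nat × Int) multiplierDigit =>
          (st.1 + 1, binary_lunar_addition st.2
            (valMSB ((lsbDigits x).reverse.map fun z => min z multiplierDigit) * 10 ^ st.1)))
          (t, R)).2 ∧
      ∀ k, dig ((suf.foldl (fun (st : Nat × Int) multiplierDigit =>
          (st.1 + 1, binary_lunar_addition st.2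
            (valMSB ((lsbDigits x).reverse.map fun z => min z multiplierDigit) * 10 ^ st.1)))
          (t, R)).2) k = cfA (lsbDigits x) b (t + suf.length) k := by
  induction suf with
  | nil =>
    intro t R _ hR0 hRd
    simpa using ⟨hR0, hRd⟩
  | cons d rest ih =>
    intro t R hdrop hR0 hRd
    have ha := lsbDigits_bounds x
    have hdmem : d ∈ b := List.drop_subset t b (hdrop ▸ List.mem_cons_self)
    have hdb := hb d hdmem
    have hdval : b.getD t 0 = d := by
      have h0 : (b.drop t)[0]? = some d := by rw [hdrop]; rfl
      rw [List.getElem?_drop] at h0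
      simp only [Nat.add_zero] at h0
      simp [List.getD_eq_getElem?_getD, h0]
    have hdrop' : b.drop (t + 1) = rest := by
      have : (b.drop t).drop 1 = b.drop (t + 1) := by
        rw [List.drop_drop, Nat.add_comm]
      rw [← this, hdrop]
      rfl
    -- the current partial product and its digits
    have hmap : (lsbDigits x).reverse.map (fun z => min z d)
        = ((lsbDigits x).map (fun z => min z d)).reverse := by
      rw [List.map_reverse]
    have hminb : ∀ e ∈ List.replicate t (0:Int) ++ (lsbDigits x).map (fun z => min z d),
        0 ≤ e ∧ e < 10 := by
      intro e he
      rcases List.mem_append.mp he with he | he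
      · rw [List.eq_of_mem_replicate he]; norm_num
      · obtain ⟨z, hz, rfl⟩ := List.mem_map.mp he
        have := ha z hz
        constructor
        · exact le_min (this.1) hdb.1
        · exact lt_of_le_of_lt (min_le_left _ _) this.2
    have hcurval : valMSB ((lsbDigits x).reverse.map fun z => min z d) * 10 ^ t
        = digSL (List.replicate t 0 ++ (lsbDigits x).map (fun z => min z d)) := by
      rw [hmap, valMSB_reverse, digSL_shift]
    have hcur0 : 0 ≤ valMSB ((lsbDigits x).reverse.map fun z => min z d) * 10 ^ t := by
      rw [hcurval]
      exact digSL_nonneg _ (fun e he => (hminb e he).1)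
    have hcurd : ∀ k, dig (valMSB ((lsbDigits x).reverse.map fun z => min z d) * 10 ^ t) k
        = termA (lsbDigits x) b k t := by
      intro k
      rw [hcurval, dig_digSL _ hminb, getD_replicate_append]
      unfold termA
      rcases Decidable.em (k < t) with hk | hk
      · rw [if_pos hk, if_neg (by omega)]
      · rw [if_neg hk, if_pos (by omega), hdval]
        rcases Decidable.em (k - t < (lsbDigits x).length) with hk2 | hk2
        · rw [List.getD_eq_getElem _ _ (by simpa using hk2), List.getElem_map,
            ← List.getD_eq_getElem _ _ hk2]
        · rw [List.getD_eq_default _ _ (by simpa using hk2),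
            List.getD_eq_default _ _ (by omega : (lsbDigits x).length ≤ k - t)]
          exact (min_eq_left hdb.1).symm
    -- one step of the fold
    rw [List.foldl_cons]
    have hstep := add_spec hR0 hcur0
    have hRd' : ∀ k, dig (binary_lunar_addition R
        (valMSB ((lsbDigits x).reverse.map fun z => min z d) * 10 ^ t)) k
        = cfA (lsbDigits x) b (t + 1) k := by
      intro k
      rw [hstep.2 k, hRd k, hcurd k]
      unfold cfA
      rw [fmax_succ]
    have := ih (t + 1) _ hdrop' hstep.1 hRd'
    refine ⟨this.1, fun k => ?_⟩
    rw [this.2 k]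
    congr 1
    simp only [List.length_cons]
    omega

theorem A_final (x y : Int) :
    0 ≤ binary_lunar_multiplication x y ∧
      ∀ k, dig (binary_lunar_multiplication x y) k
        = cfA (lsbDigits x) (lsbDigits y) (lsbDigits y).length k := by
  unfold binary_lunar_multiplication
  simp only [pyDigits, List.reverse_reverse]
  have h0 : (lsbDigits y).drop 0 = lsbDigits y := List.drop_zero
  have hR0 : (0:Int) ≤ 0 := le_refl 0
  have hRd : ∀ k, dig 0 k = cfA (lsbDigits x) (lsbDigits y) 0 k := by
    intro k
    simp [dig, cfA, fmax]
  have := A_loop x (lsbDigits y) (lsbDigits_bounds y) (lsbDigits y) 0 0 h0 hR0 hRd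
  simpa using this

theorem B_inner_len (a b : List Int) (i : Nat) (m : Nat) (res : List Int) :
    ((List.range m).foldl (fun res j =>
      if min (a.getD i 0) (b.getD j 0) > res.getD (i + j) 0
      then res.set (i + j) (min (a.getD i 0) (b.getD j 0)) else res) res).length
      = res.length := by
  induction m with
  | zero => simp
  | succ m ih =>
    rw [List.range_succ, List.foldl_append]
    simp only [List.foldl_cons, List.foldl_nil]
    split
    · rw [List.length_set, ih]
    · exact ih

theorem B_inner (a b : List Int) (i : Nat) (m : Nat) (res : List Int) (k : Nat) :
    ((List.range m).foldl (fun res j =>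
      if min (a.getD i 0) (b.getD j 0) > res.getD (i + j) 0
      then res.set (i + j) (min (a.getD i 0) (b.getD j 0)) else res) res).getD k 0
      = if i ≤ k ∧ k - i < m ∧ k < res.length
        then max (res.getD k 0) (min (a.getD i 0) (b.getD (k - i) 0))
        else res.getD k 0 := by
  induction m generalizing k with
  | zero => simp
  | succ m ih =>
    rw [List.range_succ, List.foldl_append]
    simp only [List.foldl_cons, List.foldl_nil]
    set prev := (List.range m).foldl (fun res j =>
      if min (a.getD i 0) (b.getD j 0) > res.getD (i + j) 0
      then res.set (i + j) (min (a.getD i 0) (b.getD j 0)) else res) res with hprev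
    have hplen : prev.length = res.length := B_inner_len a b i m res
    have hstep : ∀ k, (if min (a.getD i 0) (b.getD m 0) > prev.getD (i + m) 0
        then prev.set (i + m) (min (a.getD i 0) (b.getD m 0)) else prev).getD k 0
        = if i + m = k ∧ k < res.length
          then max (prev.getD k 0) (min (a.getD i 0) (b.getD m 0))
          else prev.getD k 0 := by
      intro k
      split
      · rename_i hgt
        rw [getD_set', hplen]
        rcases Decidable.em (i + m = k ∧ k < res.length) with h | h
        · rw [if_pos (⟨h.1, by omega⟩ : i + m = k ∧ i + m < res.length), if_pos h, ← h.1]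
          exact (max_eq_right (le_of_lt hgt)).symm
        · rw [if_neg (fun hc => h ⟨hc.1, by omega⟩), if_neg h]
      · rename_i hle
        rcases Decidable.em (i + m = k ∧ k < res.length) with h | h
        · rw [if_pos h, ← h.1]
          exact (max_eq_left (by omega)).symm
        · rw [if_neg h]
    rw [hstep k, ih k]
    rcases Decidable.em (i + m = k ∧ k < res.length) with h1 | h1
    · rw [if_pos h1, if_neg (by omega : ¬ (i ≤ k ∧ k - i < m ∧ k < res.length)),
        if_pos (by omega : i ≤ k ∧ k - i < m + 1 ∧ k < res.length)]
      have hkim : k - i = m := by omega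
      rw [hkim]
    · rw [if_neg h1]
      rcases Decidable.em (i ≤ k ∧ k - i < m ∧ k < res.length) with h2 | h2
      · rw [if_pos h2, if_pos (by omega)]
      · rw [if_neg h2, if_neg (by omega)]

theorem B_outer (a b : List Int) (L : Nat) (n : Nat) :
    (((List.range n).foldl (fun res i =>
        (List.range b.length).foldl (fun res j =>
          if min (a.getD i 0) (b.getD j 0) > res.getD (i + j) 0
          then res.set (i + j) (min (a.getD i 0) (b.getD j 0)) else res) res)
      (List.replicate L 0)).length = L) ∧
    ∀ k, (((List.range n).foldl (fun res i =>
        (List.range b.length).foldl (fun res j =>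
          if min (a.getD i 0) (b.getD j 0) > res.getD (i + j) 0
          then res.set (i + j) (min (a.getD i 0) (b.getD j 0)) else res) res)
      (List.replicate L 0)).getD k 0) = cfB a b L n k := by
  induction n with
  | zero =>
    constructor
    · simp
    · intro k
      show (List.replicate L (0:Int)).getD k 0 = cfB a b L 0 k
      rcases Decidable.em (k < L) with h | h
      · rw [List.getD_eq_getElem _ _ (by simpa using h)]
        simp [cfB, fmax]
      · rw [List.getD_eq_default _ _ (by simpa using h)]
        simp [cfB, fmax]
  | succ n ih =>
    have hlen := ih.1
    constructor
    · rw [List.range_succ, List.foldl_append]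
      simp only [List.foldl_cons, List.foldl_nil]
      rw [B_inner_len, hlen]
    · intro k
      rw [List.range_succ, List.foldl_append]
      simp only [List.foldl_cons, List.foldl_nil]
      rw [B_inner, hlen, ih.2 k]
      unfold cfB
      rw [fmax_succ]
      unfold termB
      rcases Decidable.em (n ≤ k ∧ k - n < b.length ∧ k < L) with h | h
      · rw [if_pos h, if_pos h]
      · rw [if_neg h, if_neg h]
        exact (max_eq_left (fmax_nonneg _ _)).symm

theorem B_final (x y : Int) :
    0 ≤ binary_lunar_multiplication_alt x y ∧
      ∀ k, dig (binary_lunar_multiplication_alt x y) k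
        = cfB (lsbDigits x) (lsbDigits y)
            ((lsbDigits x).length + (lsbDigits y).length - 1) (lsbDigits x).length k := by
  have ha := lsbDigits_bounds x
  have hb := lsbDigits_bounds y
  set a := lsbDigits x
  set b := lsbDigits y
  set L := a.length + b.length - 1 with hL
  unfold binary_lunar_multiplication_alt
  simp only [pyDigits, List.reverse_reverse]
  have hout := B_outer a b L a.length
  set res := (List.range a.length).foldl (fun res i =>
      (List.range b.length).foldl (fun res j =>
        if min (a.getD i 0) (b.getD j 0) > res.getD (i + j) 0
        then res.set (i + j) (min (a.getD i 0) (b.getD j 0)) else res) res)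
    (List.replicate L 0) with hres
  have htermb : ∀ n k, 0 ≤ termB a b L k n ∧ termB a b L k n < 10 := by
    intro n k
    unfold termB
    split
    · have b1 := bounded_getD a ha n
      have b2 := bounded_getD b hb (k - n)
      constructor
      · exact le_min b1.1 b2.1
      · exact lt_of_le_of_lt (min_le_left _ _) b1.2
    · norm_num
  have hcfb : ∀ n k, 0 ≤ cfB a b L n k ∧ cfB a b L n k < 10 := by
    intro n k
    refine ⟨fmax_nonneg _ _, ?_⟩
    have : fmax n (termB a b L k) ≤ 9 :=
      fmax_le _ _ 9 (fun j _ => by have := htermb j k; omega) (by norm_num)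
    unfold cfB
    omega
  have hresb : ∀ d ∈ res, 0 ≤ d ∧ d < 10 := by
    intro d hd
    obtain ⟨k, hk, rfl⟩ := List.getElem_of_mem hd
    rw [← res.getD_eq_getElem 0 hk, hout.2 k]
    exact hcfb a.length k
  rw [valMSB_reverse]
  refine ⟨digSL_nonneg _ (fun d hd => (hresb d hd).1), fun k => ?_⟩
  rw [dig_digSL _ hresb k, hout.2 k]

theorem reindex (a b : List Int) (ha : ∀ d ∈ a, 0 ≤ d ∧ d < 10) (hb : ∀ d ∈ b, 0 ≤ d ∧ d < 10)
    (k : Nat) :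
    cfA a b b.length k = cfB a b (a.length + b.length - 1) a.length k := by
  have hbpos : ∀ j, 0 ≤ b.getD j 0 := fun j => (bounded_getD b hb j).1
  have hapos : ∀ i, 0 ≤ a.getD i 0 := fun i => (bounded_getD a ha i).1
  apply le_antisymm
  · apply fmax_le
    · intro j hj
      unfold termA
      rcases Decidable.em (j ≤ k) with hjk | hjk
      · rw [if_pos hjk]
        rcases Decidable.em (k - j < a.length ∧ k < a.length + b.length - 1) with h | h
        · have hkj : k - (k - j) = j := by omega
          have hT : termB a b (a.length + b.length - 1) k (k - j)
              = min (a.getD (k - j) 0) (b.getD j 0) := by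
            unfold termB
            rw [if_pos ⟨by omega, by rw [hkj]; exact hj, h.2⟩, hkj]
          rw [← hT]
          exact fmax_ge _ _ _ (by omega)
        · have hz : a.getD (k - j) 0 = 0 := by
            rcases Decidable.em (k - j < a.length) with h2 | h2
            · exfalso
              apply h
              refine ⟨h2, ?_⟩
              omega
            · exact List.getD_eq_default _ _ (by omega)
          rw [hz, min_eq_left (hbpos j)]
          exact fmax_nonneg _ _
      · rw [if_neg hjk]
        exact fmax_nonneg _ _
    · exact fmax_nonneg _ _
  · apply fmax_le
    · intro i hi
      unfold termB
      rcases Decidable.em (i ≤ k ∧ k - i < b.length ∧ k < a.length + b.length - 1) with h | h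
      · rw [if_pos h]
        have : termA a b k (k - i) = min (a.getD i 0) (b.getD (k - i) 0) := by
          unfold termA
          rw [if_pos (by omega)]
          have : k - (k - i) = i := by omega
          rw [this]
        rw [← this]
        exact fmax_ge _ _ _ (by omega)
      · rw [if_neg h]
        exact fmax_nonneg _ _
    · exact fmax_nonneg _ _

theorem dig_all_zero {y : Int} (hy : 0 ≤ y) (h : ∀ k, dig y k = 0) : y = 0 := by
  by_contra hne
  have hpos : 0 < y := by omega
  -- strong induction on y.toNat via well-founded auxiliary
  have aux : ∀ (n : Nat), ∀ (z : Int), z.toNat = n → 0 ≤ z → (∀ k, dig z k = 0) → z = 0 := by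
    intro n
    induction n using Nat.strong_induction_on with
    | _ n ih =>
      intro z hzn hz0 hzd
      rcases Decidable.em (z = 0) with h0 | h0
      · exact h0
      · have hzpos : 0 < z := by omega
        have hm : z % 10 = 0 := by
          have := hzd 0
          unfold dig at this
          simpa using this
        have hdQ : ∀ k, dig (z / 10) k = 0 := fun k => by rw [← dig_succ]; exact hzd (k + 1)
        have hq0 : 0 ≤ z / 10 := Int.ediv_nonneg (by omega) (by norm_num)
        have hqlt : (z / 10).toNat < n := by
          have : z / 10 < z := Int.ediv_lt_of_lt_mul (by norm_num) (by omega)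
          omega
        have := ih _ hqlt (z / 10) rfl hq0 hdQ
        omega
  exact absurd (aux y.toNat y rfl hy h) hne

theorem dig_ext {x y : Int} (hx : 0 ≤ x) (hy : 0 ≤ y) (h : ∀ k, dig x k = dig y k) :
    x = y := by
  have aux : ∀ (n : Nat), ∀ (z w : Int), z.toNat = n → 0 ≤ z → 0 ≤ w →
      (∀ k, dig z k = dig w k) → z = w := by
    intro n
    induction n using Nat.strong_induction_on with
    | _ n ih =>
      intro z w hzn hz0 hw0 hzw
      rcases Decidable.em (z = 0) with h0 | h0
      · subst h0
        exact (dig_all_zero hw0 (fun k => by rw [← hzw k]; simp [dig])).symm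
      · have hzpos : 0 < z := by omega
        have hm : z % 10 = w % 10 := by
          have := hzw 0
          unfold dig at this
          simpa using this
        have hdQ : ∀ k, dig (z / 10) k = dig (w / 10) k := fun k => by
          rw [← dig_succ, ← dig_succ]; exact hzw (k + 1)
        have hq0 : 0 ≤ z / 10 := Int.ediv_nonneg (by omega) (by norm_num)
        have hw0' : 0 ≤ w / 10 := Int.ediv_nonneg (by omega) (by norm_num)
        have hqlt : (z / 10).toNat < n := by
          have : z / 10 < z := Int.ediv_lt_of_lt_mul (by norm_num) (by omega)
          omega
        have hq := ih _ hqlt (z / 10) (w / 10) rfl hq0 hw0' hdQ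
        omega
  exact aux x.toNat x y rfl hx hy h

-- ===== VERDICT (by name: the statement is the Claim_ definition above) =====
theorem binary_lunar_multiplication_spec : Claim_equal_binary_lunar_multiplication := by
  intro x y _ hpre
  obtain ⟨hx, hy⟩ := hpre
  unfold Spec_binary_lunar_multiplication
  obtain ⟨hA0, hAd⟩ := A_final x y
  obtain ⟨hB0, hBd⟩ := B_final x y
  refine dig_ext hA0 hB0 (fun k => ?_)
  rw [hAd k, hBd k, reindex _ _ (lsbDigits_bounds x) (lsbDigits_bounds y) k]
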